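-- pv_equiv track=rewrite | github.com/yubin-park/hccpy | hccpy/_V28I0ED1.py | apply_agesex_edits
-- ===== SOURCE A (Python) =====
-- def apply_agesex_edits(cc_dct, age, sex):
--     # age/sex edits. see "V28I0ED1.TXT"
--
--     # Factor VIII or XI deficiency
--     e_set0 = {"D66", "D67"}
--
--     e_set1 = {
--             "J410", "J411", "J418", "J42", "J430",
--             "J431", "J432", "J438", "J439", "J440",
--             "J441", "J449", "J982", "J983"
--             }
--
--     e_set2 = {
--             "C50011", "C50012", "C50019", "C50021",
--             "C50022", "C50029", "C50111", "C50112",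
--             "C50119", "C50121", "C50122", "C50129",
--             "C50211", "C50212", "C50219", "C50221",
--             "C50222", "C50229", "C50311", "C50312",
--             "C50319", "C50321", "C50322", "C50329",
--             "C50411", "C50412", "C50419", "C50421",
--             "C50422", "C50429", "C50511", "C50512",
--             "C50519", "C50521", "C50522", "C50529",
--             "C50611", "C50612", "C50619", "C50621",
--             "C50622", "C50629", "C50811", "C50812",
--             "C50819", "C50821", "C50822", "C50829",
--             "C50911", "C50912", "C50919", "C50921",
--             "C50922", "C50929"
--               }
--
--     e_set3 = {
--                 "P040",  "P041",  "P0411", "P0412",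
--                 "P0413", "P0414", "P0415", "P0416",
--                 "P0417", "P0418", "P0419", "P041A",
--                 "P042",  "P043",  "P0440", "P0441",
--                 "P0442", "P0449", "P045",  "P046",
--                 "P048",  "P0481", "P0489", "P049",
--                 "P270",  "P271",  "P278",  "P279",
--                 "P930",  "P938",  "P961",  "P962"
--                 }
--
--     if sex == "F":
--         # for dx in (dx for dx in elst0 if dx in cc_dct):
--         for dx in (e_set0 & cc_dct.keys()):
--             cc_dct[dx] = ["HCC112"] # Immune Thrombocytopenia and Specified Coagulation Defects and Other Specified Hematological Disorders
--
--     if age < 18: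
--         # for dx in (dx for dx in elst1 if dx in cc_dct):
--         for dx in (e_set1 & cc_dct.keys()):
--             cc_dct[dx] = ["HCCNA"] # Respiritry codes
--
--     if age < 50 :
--         # for dx in (dx for dx in elst2 if dx in cc_dct):
--         for dx in (e_set2 & cc_dct.keys()):
--             cc_dct[dx] = ["HCC22"] # Bladder, Colorectal, and Other Cancers
--
--     if age >= 2 :
--         # for dx in (dx for dx in elst3 if dx in cc_dct):
--         for dx in (e_set3 & cc_dct.keys()):
--             cc_dct[dx] = ["HCCNA"] # Newborn codes
--
--     return cc_dct
-- ===== SOURCE B (Python) =====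
-- # Builds a conditional override table (rules dict) once, with the code sets
-- # generated from prefix/suffix patterns, then updates the dict in one pass via
-- # table lookup; mutates cc_dct in place like A (return value is what's proved).
--
-- def _expand(prefix, chars):
--     return [prefix + c for c in chars]
--
-- _E0 = ["D66", "D67"]
--
-- _E1 = (_expand("J41", "018") + ["J42"] + _expand("J43", "01289")
--        + _expand("J44", "019") + _expand("J98", "23"))
--
-- _E2 = ["C50" + x + y + z for x in "012345689" for y in "12" for z in "129"]
--
-- _E3 = (_expand("P04", "01") + _expand("P041", "123456789A")
--        + _expand("P04", "23") + _expand("P044", "0129")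
--        + _expand("P04", "56") + ["P048"] + _expand("P048", "19")
--        + ["P049"] + _expand("P27", "0189") + _expand("P93", "08")
--        + _expand("P96", "12"))
--
--
-- def apply_agesex_edits(cc_dct, age, sex):
--     rules = {}
--     if sex == "F":
--         rules.update((dx, ["HCC112"]) for dx in _E0)
--     if age < 18:
--         rules.update((dx, ["HCCNA"]) for dx in _E1)
--     if age < 50:
--         rules.update((dx, ["HCC22"]) for dx in _E2)
--     if age >= 2:
--         rules.update((dx, ["HCCNA"]) for dx in _E3)
--     for dx in list(cc_dct):
--         v = rules.get(dx)
--         if v is not None: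
--             cc_dct[dx] = list(v)
--     return cc_dct
-- ===== Notes on version B (the rewrite author's own statement) =====
-- stated objective: alternative
-- what changed: B first builds a conditional override table (a rules dict keyed by code, with the four code sets generated from prefix/suffix patterns instead of written out) and then updates the input dict in one lookup pass, instead of A's four guarded loops over set-intersections with the key view.
import Mathlib
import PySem

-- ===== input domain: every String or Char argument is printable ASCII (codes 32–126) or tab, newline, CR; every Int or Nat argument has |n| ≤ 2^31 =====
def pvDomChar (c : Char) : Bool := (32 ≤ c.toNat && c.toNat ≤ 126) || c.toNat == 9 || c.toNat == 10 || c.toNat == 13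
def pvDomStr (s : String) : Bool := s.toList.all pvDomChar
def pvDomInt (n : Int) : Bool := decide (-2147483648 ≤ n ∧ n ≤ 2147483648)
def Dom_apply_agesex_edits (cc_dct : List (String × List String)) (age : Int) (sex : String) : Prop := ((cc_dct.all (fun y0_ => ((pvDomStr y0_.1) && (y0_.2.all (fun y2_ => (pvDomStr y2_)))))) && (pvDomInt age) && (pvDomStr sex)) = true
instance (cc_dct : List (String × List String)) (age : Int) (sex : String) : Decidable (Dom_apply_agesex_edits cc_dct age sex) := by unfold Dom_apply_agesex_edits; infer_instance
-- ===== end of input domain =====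

-- B builds a conditional override table (rules dict, code sets generated from
-- prefix/suffix patterns) and applies it to the input dict in one lookup pass,
-- instead of A's four guarded loops over set∩keys intersections (alternative
-- decomposition, same cost). Python A mutates cc_dct in place and returns it
-- (B does the same); the equivalence proved here is about the returned dict value.

-- ===== PORT A =====
-- the four Python set literals, as lists of their (distinct) elements
def pvESet0 : List String := ["D66", "D67"]
def pvESet1 : List String :=
  ["J410", "J411", "J418", "J42", "J430",
   "J431", "J432", "J438", "J439", "J440",
   "J441", "J449", "J982", "J983"]
def pvESet2 : List String :=
  ["C50011", "C50012", "C50019", "C50021",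
   "C50022", "C50029", "C50111", "C50112",
   "C50119", "C50121", "C50122", "C50129",
   "C50211", "C50212", "C50219", "C50221",
   "C50222", "C50229", "C50311", "C50312",
   "C50319", "C50321", "C50322", "C50329",
   "C50411", "C50412", "C50419", "C50421",
   "C50422", "C50429", "C50511", "C50512",
   "C50519", "C50521", "C50522", "C50529",
   "C50611", "C50612", "C50619", "C50621",
   "C50622", "C50629", "C50811", "C50812",
   "C50819", "C50821", "C50822", "C50829",
   "C50911", "C50912", "C50919", "C50921",
   "C50922", "C50929"]
def pvESet3 : List String :=
  ["P040",  "P041",  "P0411", "P0412",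
   "P0413", "P0414", "P0415", "P0416",
   "P0417", "P0418", "P0419", "P041A",
   "P042",  "P043",  "P0440", "P0441",
   "P0442", "P0449", "P045",  "P046",
   "P048",  "P0481", "P0489", "P049",
   "P270",  "P271",  "P278",  "P279",
   "P930",  "P938",  "P961",  "P962"]

-- one of A's loops: 'for dx in (e_set & cc_dct.keys()): cc_dct[dx] = c'.
-- The Python set intersection is iterated in arbitrary order; since each step only
-- overwrites an existing key in place, the result is order-independent, and it is
-- ported as the set's element list filtered by membership in the dict.
def pvPass (d : PySem.Dict String (List String)) (L : List String) (c : List String) :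
    PySem.Dict String (List String) :=
  (L.filter (fun k => d.contains k)).foldl (fun acc k => acc.insert k c) d

def apply_agesex_edits (cc_dct : List (String × List String)) (age : Int) (sex : String) :
    List (String × List String) :=
  let d0 := PySem.Dict.mk cc_dct
  let d1 := if sex == "F" then pvPass d0 pvESet0 ["HCC112"] else d0
  let d2 := if age < 18 then pvPass d1 pvESet1 ["HCCNA"] else d1
  let d3 := if age < 50 then pvPass d2 pvESet2 ["HCC22"] else d2
  let d4 := if 2 ≤ age then pvPass d3 pvESet3 ["HCCNA"] else d3
  d4.items

-- ===== PORT B =====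
-- Source B's _expand(prefix, chars): one code per suffix character
def pvExpand (p : List Char) (cs : List Char) : List String :=
  cs.map (fun c => String.mk (p ++ [c]))

def pvB1 : List String :=
  pvExpand "J41".toList "018".toList ++ ["J42"] ++ pvExpand "J43".toList "01289".toList
    ++ pvExpand "J44".toList "019".toList ++ pvExpand "J98".toList "23".toList
def pvB2 : List String :=
  "012345689".toList.flatMap (fun x =>
    "12".toList.flatMap (fun y =>
      "129".toList.map (fun z => String.mk ("C50".toList ++ [x, y, z]))))
def pvB3 : List String :=
  pvExpand "P04".toList "01".toList ++ pvExpand "P041".toList "123456789A".toList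
    ++ pvExpand "P04".toList "23".toList ++ pvExpand "P044".toList "0129".toList
    ++ pvExpand "P04".toList "56".toList ++ ["P048"] ++ pvExpand "P048".toList "19".toList
    ++ ["P049"] ++ pvExpand "P27".toList "0189".toList ++ pvExpand "P93".toList "08".toList
    ++ pvExpand "P96".toList "12".toList

-- rules.update((dx, v) for dx in L)
def pvAddAll (r : PySem.Dict String (List String)) (L : List String) (v : List String) :
    PySem.Dict String (List String) :=
  L.foldl (fun acc k => acc.insert k v) r

-- the conditional override table
def pvRules (age : Int) (sex : String) : PySem.Dict String (List String) :=
  let r0 : PySem.Dict String (List String) := PySem.Dict.empty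
  let r1 := if sex == "F" then pvAddAll r0 ["D66", "D67"] ["HCC112"] else r0
  let r2 := if age < 18 then pvAddAll r1 pvB1 ["HCCNA"] else r1
  let r3 := if age < 50 then pvAddAll r2 pvB2 ["HCC22"] else r2
  if 2 ≤ age then pvAddAll r3 pvB3 ["HCCNA"] else r3

def apply_agesex_edits_alt (cc_dct : List (String × List String)) (age : Int) (sex : String) :
    List (String × List String) :=
  let d := PySem.Dict.mk cc_dct
  let rules := pvRules age sex
  (d.keys.foldl (fun acc dx =>
      match rules.get? dx with
      | some v => acc.insert dx v
      | none => acc) d).items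

-- ===== PRECONDITION & SPEC =====
def Spec_apply_agesex_edits (cc_dct : List (String × List String)) (age : Int) (sex : String) (out : List (String × List String)) : Prop := out = apply_agesex_edits_alt cc_dct age sex
instance (cc_dct : List (String × List String)) (age : Int) (sex : String) (out : List (String × List String)) : Decidable (Spec_apply_agesex_edits cc_dct age sex out) := by unfold Spec_apply_agesex_edits; infer_instance

-- ===== CLAIM (what is proved, stated in full; the proofs are below) =====
def Claim_equal_apply_agesex_edits : Prop := ∀ (cc_dct : List (String × List String)) (age : Int) (sex : String), Dom_apply_agesex_edits cc_dct age sex → Spec_apply_agesex_edits cc_dct age sex (apply_agesex_edits cc_dct age sex)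

-- ===== LEMMAS AND PROOFS =====

-- B's generated code lists enumerate exactly A's set literals
lemma pvB1_eq : pvB1 = pvESet1 := by decide
lemma pvB2_eq : pvB2 = pvESet2 := by decide
lemma pvB3_eq : pvB3 = pvESet3 := by decide

-- a fold of overwriting inserts (value depending only on the key) over keys that are
-- all present in the dict acts as a map on the items list
lemma foldl_ins_items (f : String → Option (List String)) :
    ∀ (L : List String) (d : PySem.Dict String (List String)),
      (∀ k ∈ L, d.contains k = true) →
      (L.foldl (fun acc k => match f k with | some v => acc.insert k v | none => acc) d).items
        = d.items.map (fun p => if p.1 ∈ L then (match f p.1 with | some v => (p.1, v) | none => p) else p) := by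
  intro L
  induction L with
  | nil =>
      intro d _
      simp
  | cons k L ih =>
      intro d hc
      rcases hf : f k with _ | v
      · have hstep : (k :: L).foldl
              (fun acc k => match f k with | some v => acc.insert k v | none => acc) d
            = L.foldl (fun acc k => match f k with | some v => acc.insert k v | none => acc) d := by
          simp [List.foldl_cons, hf]
        rw [hstep, ih d (fun x hx => hc x (List.mem_cons_of_mem _ hx))]
        apply List.map_congr_left
        intro p _
        by_cases hk : p.1 = k
        · simp [hk, hf]
        · simp [List.mem_cons, hk]
      · have hck : d.contains k = true := hc k (List.mem_cons_self ..)
        have hstep : (k :: L).foldl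
              (fun acc k => match f k with | some v => acc.insert k v | none => acc) d
            = L.foldl (fun acc k => match f k with | some v => acc.insert k v | none => acc)
                (d.insert k v) := by
          simp [List.foldl_cons, hf]
        have hc' : ∀ x ∈ L, (d.insert k v).contains x = true := by
          intro x hx
          rw [PySem.Dict.contains_insert]
          simp [hc x (List.mem_cons_of_mem _ hx)]
        rw [hstep, ih (d.insert k v) hc',
            PySem.Dict.items_insert_of_contains d v hck, List.map_map]
        apply List.map_congr_left
        intro p _
        by_cases hk : p.1 = k
        · simp [Function.comp, hk, hf]
        · simp [Function.comp, hk, List.mem_cons]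

-- one (guarded) pass of A, in map form
lemma pass_items (d : PySem.Dict String (List String)) (L : List String) (c : List String)
    (g : Prop) [Decidable g] :
    (if g then pvPass d L c else d).items
      = d.items.map (fun p => if g ∧ p.1 ∈ L then (p.1, c) else p) := by
  by_cases hg : g
  · have h := foldl_ins_items (fun _ => some c) (L.filter (fun k => d.contains k)) d
      (by intro k hk; exact (List.mem_filter.mp hk).2)
    simp only [if_pos hg, pvPass]
    rw [h]
    apply List.map_congr_left
    intro p hp
    have hpc : d.contains p.1 = true :=
      (PySem.Dict.contains_iff_mem_keys d p.1).mpr (PySem.Dict.mem_keys_of_mem_items d hp)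
    simp [List.mem_filter, hpc, hg]
  · simp [hg]

-- updating a dict with a constant value over a list of keys, via get?
lemma get?_addAll (v : List String) :
    ∀ (L : List String) (r : PySem.Dict String (List String)) (k : String),
      (pvAddAll r L v).get? k = if k ∈ L then some v else r.get? k := by
  intro L
  induction L with
  | nil => intro r k; simp [pvAddAll]
  | cons a L ih =>
      intro r k
      have hstep : pvAddAll r (a :: L) v = pvAddAll (r.insert a v) L v := by
        simp [pvAddAll, List.foldl_cons]
      rw [hstep, ih]
      by_cases hL : k ∈ L
      · simp [hL, List.mem_cons]
      · by_cases hk : k = a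
        · simp [hL, hk, PySem.Dict.get?_insert_self]
        · simp [hL, hk, List.mem_cons, PySem.Dict.get?_insert_of_ne _ _ hk]

-- the B-side literal {"D66","D67"} coincides with A's pvESet0 (used only in proofs)
lemma pvE0_lit : (["D66", "D67"] : List String) = pvESet0 := rfl

-- the override table looked up: last-added block wins, i.e. priority 3 > 2 > 1 > 0
lemma rules_get (age : Int) (sex : String) (dx : String) :
    (pvRules age sex).get? dx
      = (if 2 ≤ age ∧ dx ∈ pvB3 then some ["HCCNA"]
         else if age < 50 ∧ dx ∈ pvB2 then some ["HCC22"]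
         else if age < 18 ∧ dx ∈ pvB1 then some ["HCCNA"]
         else if sex == "F" ∧ dx ∈ ["D66", "D67"] then some ["HCC112"]
         else none) := by
  unfold pvRules
  by_cases h3 : 2 ≤ age <;> by_cases h2 : age < 50 <;> by_cases h1 : age < 18 <;>
    by_cases h0 : sex = "F" <;>
      simp [h3, h2, h1, h0, get?_addAll, PySem.Dict.get?_empty] <;>
        split_ifs <;> simp_all <;> omega

-- ===== VERDICT (by name: the statement is the Claim_ definition above) =====
set_option maxHeartbeats 1000000 in
theorem apply_agesex_edits_spec : Claim_equal_apply_agesex_edits := by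
  intro cc_dct age sex _
  unfold Spec_apply_agesex_edits apply_agesex_edits apply_agesex_edits_alt
  simp only []
  have halt := foldl_ins_items (fun dx => (pvRules age sex).get? dx)
      (PySem.Dict.mk cc_dct).keys (PySem.Dict.mk cc_dct)
      (by intro k hk; exact (PySem.Dict.contains_iff_mem_keys _ k).mpr hk)
  rw [halt]
  rw [pass_items, pass_items, pass_items, pass_items, List.map_map, List.map_map, List.map_map]
  apply List.map_congr_left
  intro p hp
  have hpk : p.1 ∈ (PySem.Dict.mk cc_dct).keys := PySem.Dict.mem_keys_of_mem_items _ hp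
  simp only [if_pos hpk, rules_get, pvE0_lit, pvB1_eq, pvB2_eq, pvB3_eq]
  by_cases h3 : (2 ≤ age ∧ p.1 ∈ pvESet3) <;>
    by_cases h2 : (age < 50 ∧ p.1 ∈ pvESet2) <;>
      by_cases h1 : (age < 18 ∧ p.1 ∈ pvESet1) <;>
        by_cases h0 : (sex = "F" ∧ p.1 ∈ pvESet0) <;>
          simp [Function.comp, h3, h2, h1, h0]
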